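-- pv_equiv track=rewrite | github.com/seahrh/coding-interview | recursion/diving_board.py | all_lengths_rec
-- ===== SOURCE A (Python) =====
-- def all_lengths_rec(k, shorter, longer):
--     """Recursive solution
--     O(k) time and O(2^k) space (to store the result)
--     """
--     if k < 1:
--         raise ValueError('k must not be less than 1')
--     if k == 1:
--         return {shorter, longer}
--     res = set()
--     for l in all_lengths_rec(k - 1, shorter, longer):  #
--         res.add(l + shorter)
--         res.add(l + longer)
--     return res
-- ===== SOURCE B (Python) =====
-- def all_lengths_rec(k, shorter, longer):
--     if k < 1:
--         raise ValueError('k must not be less than 1')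
--     return {shorter * (k - i) + longer * i for i in range(k + 1)}
-- ===== Notes on version B (the rewrite author's own statement) =====
-- stated objective: faster
-- what changed: Replaces the recursion that rebuilds a growing set at each of the k levels with a closed-form set comprehension {shorter*(k-i)+longer*i for i in 0..k}, one element per possible count of longer planks.
import Mathlib
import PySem

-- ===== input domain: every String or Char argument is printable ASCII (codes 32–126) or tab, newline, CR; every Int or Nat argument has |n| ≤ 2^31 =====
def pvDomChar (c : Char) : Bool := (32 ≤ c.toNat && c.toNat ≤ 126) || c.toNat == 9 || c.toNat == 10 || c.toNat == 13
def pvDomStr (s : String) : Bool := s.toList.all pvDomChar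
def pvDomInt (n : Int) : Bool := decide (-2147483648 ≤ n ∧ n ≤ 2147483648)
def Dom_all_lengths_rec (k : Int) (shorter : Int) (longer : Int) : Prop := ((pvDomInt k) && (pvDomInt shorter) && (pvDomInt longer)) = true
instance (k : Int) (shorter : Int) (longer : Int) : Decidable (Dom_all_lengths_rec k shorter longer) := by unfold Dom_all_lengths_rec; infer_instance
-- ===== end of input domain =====

-- B replaces A's level-by-level recursion by the closed-form set comprehension
-- {shorter*(k-i) + longer*i : 0 ≤ i ≤ k} (asymptotically faster).

-- ===== PORT A =====
-- literal port of A; where the Python raises ValueError (k < 1) the port returns [] — excluded by Pre_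
def all_lengths_rec (k : Int) (shorter : Int) (longer : Int) : List Int :=
  if _h1 : k < 1 then []
  else if k = 1 then PySem.Set.ofList [shorter, longer]
  else
    (all_lengths_rec (k - 1) shorter longer).foldl
      (fun res l => PySem.Set.add (PySem.Set.add res (l + shorter)) (l + longer))
      PySem.Set.empty
termination_by k.toNat
decreasing_by omega

-- ===== PORT B =====
-- literal port of B; the set comprehension over range(k+1) is Set.ofList of the mapped list
def all_lengths_rec_alt (k : Int) (shorter : Int) (longer : Int) : List Int :=
  if k < 1 then []
  else PySem.Set.ofList ((PySem.List.pyRange 0 (k + 1) 1).map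
        (fun i => shorter * (k - i) + longer * i))

-- ===== PRECONDITION & SPEC =====
-- Python A raises ValueError for k < 1; Pre_ excludes exactly those inputs.
def Pre_all_lengths_rec (k : Int) (shorter : Int) (longer : Int) : Prop := 1 ≤ k
instance (k : Int) (shorter : Int) (longer : Int) : Decidable (Pre_all_lengths_rec k shorter longer) := by unfold Pre_all_lengths_rec; infer_instance
def pvWitness_all_lengths_rec : Int × Int × Int := (3, 1, 5)

def Spec_all_lengths_rec (k : Int) (shorter : Int) (longer : Int) (out : List Int) : Prop := out = all_lengths_rec_alt k shorter longer
instance (k : Int) (shorter : Int) (longer : Int) (out : List Int) : Decidable (Spec_all_lengths_rec k shorter longer out) := by unfold Spec_all_lengths_rec; infer_instance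

-- ===== CLAIM (what is proved, stated in full; the proofs are below) =====
def Claim_equal_all_lengths_rec : Prop := ∀ (k : Int) (shorter : Int) (longer : Int), Dom_all_lengths_rec k shorter longer → Pre_all_lengths_rec k shorter longer → Spec_all_lengths_rec k shorter longer (all_lengths_rec k shorter longer)

-- ===== LEMMAS AND PROOFS =====

-- the arithmetic progression of totals at level n: s*(n-i) + l*i = s*n + i*(l-s)
def pvProg (s l : Int) (n : Nat) : List Int :=
  (List.range (n + 1)).map (fun i : Nat => s * (n : Int) + (i : Int) * (l - s))

lemma pvProg_nodup (s l : Int) (h : l - s ≠ 0) (n : Nat) : (pvProg s l n).Nodup := by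
  unfold pvProg
  refine List.Nodup.map (f := fun i : Nat => s * (n : Int) + (i : Int) * (l - s)) ?_ List.nodup_range
  intro a b hab
  have h0 : ((a : Int) - b) * (l - s) = 0 := by ring_nf; linarith [hab]
  rcases mul_eq_zero.mp h0 with h1 | h1
  · omega
  · exact absurd h1 h

-- A's loop body
def pvStep (s l : Int) (res : List Int) (x : Int) : List Int :=
  PySem.Set.add (PySem.Set.add res (x + s)) (x + l)

-- a fold of Set.add over elements already present does nothing
lemma pvFoldl_add_subset (t acc : List Int) (h : ∀ y ∈ t, y ∈ acc) :
    t.foldl PySem.Set.add acc = acc := by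
  induction t generalizing acc with
  | nil => rfl
  | cons x xs ih =>
    simp only [List.foldl_cons]
    rw [PySem.Set.add_of_mem (h x (by simp)), ih acc (fun y hy => h y (by simp [hy]))]

-- equal-plank case: A returns the singleton [s * n]
lemma pvA_const (s : Int) (n : Nat) (h : 1 ≤ n) :
    all_lengths_rec (n : Int) s s = [s * n] := by
  induction n with
  | zero => omega
  | succ m ih =>
    rw [all_lengths_rec]
    by_cases hm : m = 0
    · subst hm; simp [PySem.Set.ofList, PySem.Set.add, PySem.Set.empty]
    · have h1 : ¬ ((m : Int) + 1 < 1) := by omega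
      have h2 : ¬ ((m : Int) + 1 = 1) := by omega
      have hc : ((m : Int) + 1 - 1) = (m : Int) := by ring
      simp only [Nat.cast_add, Nat.cast_one, h1, h2, dite_false, hc,
        ih (by omega)]
      simp [PySem.Set.add, PySem.Set.empty, List.foldl]
      ring

-- distinct-plank case: one pass of A's loop over level j of the progression builds level j+1
lemma pvChain (s l c : Int) (hd : l - s ≠ 0) (j : Nat) (hj : 1 ≤ j) :
    ((List.range j).map (fun i : Nat => c + (i : Int) * (l - s))).foldl (pvStep s l) PySem.Set.empty
      = (List.range (j + 1)).map (fun i : Nat => c + s + (i : Int) * (l - s)) := by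
  induction j with
  | zero => omega
  | succ m ih =>
    by_cases hm : m = 0
    · subst hm
      simp [pvStep, PySem.Set.add, PySem.Set.empty, List.range_succ]
      omega
    · rw [List.range_succ, List.map_append, List.foldl_append, ih (by omega)]
      simp only [List.map_cons, List.map_nil, List.foldl_cons, List.foldl_nil, pvStep]
      have hmem : c + (m : Int) * (l - s) + s ∈
          (List.range (m + 1)).map (fun i : Nat => c + s + (i : Int) * (l - s)) := by
        simp only [List.mem_map, List.mem_range]
        exact ⟨m, by omega, by ring⟩
      rw [PySem.Set.add_of_mem hmem]
      have hnmem : c + (m : Int) * (l - s) + l ∉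
          (List.range (m + 1)).map (fun i : Nat => c + s + (i : Int) * (l - s)) := by
        simp only [List.mem_map, List.mem_range]
        rintro ⟨i, hi, he⟩
        have h0 : ((m : Int) + 1 - i) * (l - s) = 0 := by ring_nf; linarith [he]
        rcases mul_eq_zero.mp h0 with h1 | h1
        · omega
        · exact hd h1
      rw [PySem.Set.add_of_not_mem hnmem]
      rw [List.range_succ (n := m + 1), List.map_append]
      simp only [List.map_cons, List.map_nil]
      congr 1
      push_cast; ring

-- distinct-plank case: A returns the full progression at level n
lemma pvA_prog (s l : Int) (hd : l - s ≠ 0) (n : Nat) (h : 1 ≤ n) :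
    all_lengths_rec (n : Int) s l = pvProg s l n := by
  induction n with
  | zero => omega
  | succ m ih =>
    rw [all_lengths_rec]
    by_cases hm : m = 0
    · subst hm
      have hne : ¬ l = s := fun he => hd (by omega)
      simp [PySem.Set.ofList, PySem.Set.add, PySem.Set.empty, hne, pvProg, List.range_succ]
    · have h1 : ¬ ((m : Int) + 1 < 1) := by omega
      have h2 : ¬ ((m : Int) + 1 = 1) := by omega
      have hc : ((m : Int) + 1 - 1) = (m : Int) := by ring
      simp only [Nat.cast_add, Nat.cast_one, h1, h2, dite_false, hc, ih (by omega)]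
      have := pvChain s l (s * (m : Int)) hd (m + 1) (by omega)
      unfold pvProg
      rw [show ((m : Nat) + 1 : Nat) + 1 = (m + 1) + 1 from rfl]
      calc ((List.range (m + 1)).map (fun i : Nat => s * (m : Int) + (i : Int) * (l - s))).foldl
              (fun res x => PySem.Set.add (PySem.Set.add res (x + s)) (x + l)) PySem.Set.empty
          = ((List.range (m + 1)).map (fun i : Nat => s * (m : Int) + (i : Int) * (l - s))).foldl
              (pvStep s l) PySem.Set.empty := rfl
        _ = (List.range (m + 1 + 1)).map (fun i : Nat => s * (m : Int) + s + (i : Int) * (l - s)) := this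
        _ = (List.range (m + 1 + 1)).map (fun i : Nat => s * ((m : Int) + 1) + (i : Int) * (l - s)) := by
              apply List.map_congr_left; intro i _; ring
        _ = (List.range (m + 1 + 1)).map (fun i : Nat => s * (((m + 1 : Nat) : Int)) + (i : Int) * (l - s)) := by
              push_cast; rfl

-- B returns the same progression at level n
lemma pvB_prog (s l : Int) (n : Nat) (h : 1 ≤ n) :
    all_lengths_rec_alt (n : Int) s l =
      if l - s = 0 then [s * n] else pvProg s l n := by
  unfold all_lengths_rec_alt
  have h1 : ¬ ((n : Int) < 1) := by omega
  rw [if_neg h1, PySem.List.pyRange_one]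
  have h2 : ((n : Int) + 1 - 0).toNat = n + 1 := by omega
  rw [h2, List.map_map]
  have h3 : ((List.range (n + 1)).map
        ((fun i => s * ((n : Int) - i) + l * i) ∘ (fun k : Nat => 0 + (k : Int))))
      = (List.range (n + 1)).map (fun i : Nat => s * (n : Int) + (i : Int) * (l - s)) := by
    apply List.map_congr_left; intro i _; simp [Function.comp]; ring
  rw [h3]
  by_cases hd : l - s = 0
  · rw [if_pos hd]
    have hall : ∀ y ∈ (List.range (n + 1)).map (fun i : Nat => s * (n : Int) + (i : Int) * (l - s)),
        y = s * n := by
      simp only [List.mem_map, List.mem_range]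
      rintro y ⟨i, _, rfl⟩; rw [hd]; ring
    cases he : (List.range (n + 1)).map (fun i : Nat => s * (n : Int) + (i : Int) * (l - s)) with
    | nil => exact absurd (congrArg List.length he) (by simp)
    | cons x t =>
      have hx : x = s * n := hall x (by rw [he]; simp)
      have hset : PySem.Set.ofList (x :: t) = [x] := by
        rw [PySem.Set.ofList]
        simp only [List.foldl_cons]
        rw [show PySem.Set.add PySem.Set.empty x = [x] from rfl]
        exact pvFoldl_add_subset t [x] (fun y hy => by
          have := hall y (by rw [he]; simp [hy])
          simp [this, hx])
      rw [hset, hx]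
  · rw [if_neg hd]
    unfold pvProg
    exact PySem.Set.ofList_eq_self_of_nodup _ (pvProg_nodup s l hd n)

-- ===== VERDICT (by name: the statement is the Claim_ definition above) =====
theorem all_lengths_rec_spec : Claim_equal_all_lengths_rec := by
  intro k s l _ hp
  unfold Spec_all_lengths_rec
  obtain ⟨n, rfl⟩ : ∃ n : Nat, k = (n : Int) := ⟨k.toNat, by unfold Pre_all_lengths_rec at hp; omega⟩
  have hn : 1 ≤ n := by unfold Pre_all_lengths_rec at hp; omega
  rw [pvB_prog s l n hn]
  by_cases hd : l - s = 0
  · have hls : l = s := by omega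
    rw [if_pos hd, hls, pvA_const s n hn]
  · rw [if_neg hd, pvA_prog s l hd n hn]
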